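-- pv_equiv track=rewrite | github.com/OneSeven17/HW4lessonBestTotal | app/max_day_total.py | max_day_total
-- ===== SOURCE A (Python) =====
-- def max_day_total(shops_list):
--     sales_sum = []
--     for shop in shops_list:
--         sales_sum.append(max(shop))
--
--     max_day_sale = max(sales_sum)
--     sales_sum_index = []
--     index = 0
--     for sale in sales_sum:
--         if sale == max_day_sale:
--             sales_sum_index.append(index)
--             sales_sum_index.append(sale)
--
--         index += 1
--
--
--     return sales_sum_index
-- ===== SOURCE B (Python) =====
-- def max_day_total(shops_list):
--     best = None
--     result = []
--     for i, shop in enumerate(shops_list):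
--         m = max(shop)
--         if best is None or m > best:
--             best = m
--             result = [i, m]
--         elif m == best:
--             result.extend([i, m])
--     return result
-- ===== Notes on version B (the rewrite author's own statement) =====
-- stated objective: simpler
-- what changed: Single pass with a running best and a result reset on a new maximum, instead of building the whole sales_sum list, taking its max, and scanning it again.
import Mathlib
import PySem

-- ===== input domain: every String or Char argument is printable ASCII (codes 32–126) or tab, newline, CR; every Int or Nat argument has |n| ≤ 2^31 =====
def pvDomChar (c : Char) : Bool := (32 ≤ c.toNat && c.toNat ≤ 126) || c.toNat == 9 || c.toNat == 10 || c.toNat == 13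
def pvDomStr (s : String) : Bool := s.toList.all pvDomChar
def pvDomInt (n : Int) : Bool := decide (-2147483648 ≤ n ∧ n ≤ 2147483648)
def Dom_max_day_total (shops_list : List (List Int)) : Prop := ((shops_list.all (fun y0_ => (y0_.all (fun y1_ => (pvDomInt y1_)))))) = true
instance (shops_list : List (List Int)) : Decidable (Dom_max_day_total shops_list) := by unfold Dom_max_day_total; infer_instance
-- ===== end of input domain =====

-- B replaces A's two passes (build all shop maxima, take their max, rescan) by a single pass with a
-- running best that resets the result when a new maximum appears; objective: simpler, same exact value.

-- ===== PORT A =====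
def max_day_total (shops_list : List (List Int)) : List Int :=
  let sales_sum := shops_list.foldl (fun acc shop => acc ++ [(PySem.List.max? shop (fun y => y)).getD 0]) []
  -- the .getD 0 branches are unreachable under Pre_ (shops_list ≠ [], no empty shop)
  let max_day_sale := (PySem.List.max? sales_sum (fun y => y)).getD 0
  let p := sales_sum.foldl (fun (p : List Int × Int) sale =>
      (if sale = max_day_sale then p.1 ++ [p.2, sale] else p.1, p.2 + 1)) ([], 0)
  p.1

-- ===== PORT B =====
-- B-side helper: the body of B's single loop, on state (best, result)
def pvStep (st : Option Int × List Int) (q : Int × List Int) : Option Int × List Int :=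
  let m := (PySem.List.max? q.2 (fun y => y)).getD 0
  match st.1 with
  | none => (some m, [q.1, m])
  | some b =>
    if m > b then (some m, [q.1, m])
    else if m = b then (some b, st.2 ++ [q.1, m])
    else st

def max_day_total_alt (shops_list : List (List Int)) : List Int :=
  ((PySem.List.enumerate shops_list).foldl pvStep (none, [])).2

-- ===== PRECONDITION & SPEC =====
-- Pre_ excludes exactly the inputs on which A raises ValueError: an empty shops_list or any empty shop.
def Pre_max_day_total (shops_list : List (List Int)) : Prop :=
  shops_list ≠ [] ∧ ∀ shop ∈ shops_list, shop ≠ []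
instance (shops_list : List (List Int)) : Decidable (Pre_max_day_total shops_list) := by unfold Pre_max_day_total; infer_instance
def pvWitness_max_day_total : List (List Int) := [[1, 3], [4], [2, 4]]

def Spec_max_day_total (shops_list : List (List Int)) (out : List Int) : Prop := out = max_day_total_alt shops_list
instance (shops_list : List (List Int)) (out : List Int) : Decidable (Spec_max_day_total shops_list out) := by unfold Spec_max_day_total; infer_instance

-- ===== CLAIM (what is proved, stated in full; the proofs are below) =====
def Claim_equal_max_day_total : Prop := ∀ (shops_list : List (List Int)), Dom_max_day_total shops_list → Pre_max_day_total shops_list → Spec_max_day_total shops_list (max_day_total shops_list)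

-- ===== LEMMAS AND PROOFS =====

-- reference value: the [index, sale] pairs of elements equal to M, indices starting at i
def pvCollect (M : Int) : List Int → Int → List Int
  | [], _ => []
  | m :: rest, i => (if m = M then [i, m] else []) ++ pvCollect M rest (i + 1)

theorem pvA_fold (M : Int) (ms : List Int) : ∀ (acc : List Int) (i : Int),
    ms.foldl (fun (p : List Int × Int) sale =>
      (if sale = M then p.1 ++ [p.2, sale] else p.1, p.2 + 1)) (acc, i)
    = (acc ++ pvCollect M ms i, i + ms.length) := by
  induction ms with
  | nil => intro acc i; simp [pvCollect]
  | cons m rest ih =>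
    intro acc i
    simp only [List.foldl_cons, ih, pvCollect, List.length_cons]
    by_cases h : m = M <;> simp [h] <;> omega

theorem pvSales_map (shops_list : List (List Int)) : ∀ acc : List Int,
    shops_list.foldl (fun acc shop => acc ++ [(PySem.List.max? shop (fun y => y)).getD 0]) acc
    = acc ++ shops_list.map (fun shop => (PySem.List.max? shop (fun y => y)).getD 0) := by
  induction shops_list with
  | nil => simp
  | cons s rest ih => intro acc; simp [ih]

theorem pv_le_foldl_max (b : Int) (ms : List Int) : b ≤ ms.foldl max b := by
  induction ms generalizing b with
  | nil => simp
  | cons m rest ih => simpa using le_trans (le_max_left b m) (ih (max b m))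

-- invariant of B's one-pass fold once best is set
theorem pvB_fold (ms : List (List Int)) : ∀ (b : Int) (res : List Int) (i : Int),
    ((PySem.List.enumerate ms i).foldl pvStep (some b, res))
    = (some ((ms.map (fun shop => (PySem.List.max? shop (fun y => y)).getD 0)).foldl max b),
       (if (ms.map (fun shop => (PySem.List.max? shop (fun y => y)).getD 0)).foldl max b = b
        then res ++ pvCollect b (ms.map (fun shop => (PySem.List.max? shop (fun y => y)).getD 0)) i
        else pvCollect ((ms.map (fun shop => (PySem.List.max? shop (fun y => y)).getD 0)).foldl max b)
               (ms.map (fun shop => (PySem.List.max? shop (fun y => y)).getD 0)) i)) := by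
  induction ms with
  | nil => intro b res i; simp [PySem.List.enumerate_nil, pvCollect]
  | cons s rest ih =>
    intro b res i
    rw [PySem.List.enumerate_cons, List.foldl_cons]
    simp only [List.map_cons, List.foldl_cons]
    set m := (PySem.List.max? s (fun y => y)).getD 0 with hm
    set L := rest.map (fun shop => (PySem.List.max? shop (fun y => y)).getD 0) with hL
    have hub : m ≤ L.foldl max m := pv_le_foldl_max m L
    have hub2 : b ≤ L.foldl max b := pv_le_foldl_max b L
    by_cases h1 : m > b
    · have hstep : pvStep (some b, res) (i, s) = (some m, [i, m]) := by
        simp [pvStep, ← hm, h1]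
      rw [hstep, ih m [i, m] (i + 1), max_eq_right (le_of_lt h1)]
      have hnb : L.foldl max m ≠ b := by omega
      rw [if_neg hnb]
      by_cases h3 : L.foldl max m = m
      · rw [if_pos h3, h3]; simp [pvCollect]
      · rw [if_neg h3]
        have hnm : m ≠ L.foldl max m := fun h => h3 h.symm
        simp [pvCollect, hnm]
    · by_cases h2 : m = b
      · subst h2
        have hstep : pvStep (some m, res) (i, s) = (some m, res ++ [i, m]) := by
          simp [pvStep, ← hm]
        rw [hstep, ih m (res ++ [i, m]) (i + 1), max_self]
        by_cases h3 : L.foldl max m = m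
        · rw [if_pos h3, if_pos h3]; simp [pvCollect]
        · rw [if_neg h3, if_neg h3]
          have hnm : m ≠ L.foldl max m := fun h => h3 h.symm
          simp [pvCollect, hnm]
      · have hstep : pvStep (some b, res) (i, s) = (some b, res) := by
          simp [pvStep, ← hm, h1, h2]
        rw [hstep, ih b res (i + 1), max_eq_left (by omega : m ≤ b)]
        by_cases h3 : L.foldl max b = b
        · rw [if_pos h3, if_pos h3]; simp [pvCollect, h2]
        · rw [if_neg h3, if_neg h3]
          have hnm : m ≠ L.foldl max b := by omega
          simp [pvCollect, hnm]

-- ===== VERDICT (by name: the statement is the Claim_ definition above) =====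
theorem max_day_total_spec : Claim_equal_max_day_total := by
  intro shops hdom hpre
  obtain ⟨hne, -⟩ := hpre
  unfold Spec_max_day_total max_day_total max_day_total_alt
  obtain ⟨s, rest, rfl⟩ : ∃ s rest, shops = s :: rest := by
    cases shops with
    | nil => exact absurd rfl hne
    | cons s rest => exact ⟨s, rest, rfl⟩
  rw [pvSales_map, List.nil_append]
  simp only [List.map_cons, PySem.List.max?_id_cons, Option.getD_some]
  set m := (PySem.List.max? s (fun y => y)).getD 0 with hm
  set L := rest.map (fun shop => (PySem.List.max? shop (fun y => y)).getD 0) with hL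
  rw [pvA_fold (L.foldl max m) (m :: L) [] 0]
  have hstep : pvStep (none, ([] : List Int)) (0, s) = (some m, [0, m]) := by
    simp [pvStep, ← hm]
  rw [PySem.List.enumerate_cons, List.foldl_cons, hstep,
      show (0 : Int) + 1 = 1 from rfl, pvB_fold rest m [0, m] 1, ← hL]
  have hub : m ≤ L.foldl max m := pv_le_foldl_max m L
  by_cases h3 : L.foldl max m = m
  · rw [if_pos h3, h3]; simp [pvCollect]
  · rw [if_neg h3]
    have hnm : m ≠ L.foldl max m := fun h => h3 h.symm
    simp [pvCollect, hnm]
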